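-- pv_equiv track=rewrite | github.com/Lin-Group-at-UMass/FBGNN-MBE | src/make_engergy.py | make_comp_body
-- ===== SOURCE A (Python) =====
-- def make_comp_body(t, start_i, two_body_num, three_body_num):
--     comp2idx_2b = dict()
--     comp2idx_3b = dict()
--     idx2comp_2b = dict()
--     idx2comp_3b = dict()
--
--     for i in range(start_i, t + 1):
--         for j in range(i + 1, t + 1):
--             if i not in comp2idx_2b:
--                 comp2idx_2b[i] = dict()
--             comp2idx_2b[i][j] = two_body_num
--             idx2comp_2b[two_body_num] = [i, j]
--             two_body_num += 1
--             for k in range(j + 1, t + 1):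
--                 if i not in comp2idx_3b:
--                     comp2idx_3b[i] = dict()
--                 if j not in comp2idx_3b[i]:
--                     comp2idx_3b[i][j] = dict()
--                 comp2idx_3b[i][j][k] = three_body_num
--                 idx2comp_3b[three_body_num] = [i, j, k]
--                 three_body_num += 1
--     return idx2comp_2b, idx2comp_3b, comp2idx_2b
-- ===== SOURCE B (Python) =====
-- def make_comp_body(t, start_i, two_body_num, three_body_num):
--     # Pascal-identity construction: build combination lists back-to-front from
--     # singles -> pairs -> triples (each triple is the head prefixed to a
--     # sub-pair), so there is no triple-nested loop; then one reversal and flat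
--     # fill passes over the pair/triple lists; the dead comp2idx_3b nest is gone.
--     rsing, rprs, rtrps = [], [], []
--     for s in range(t, start_i - 1, -1):
--         rtrps.extend([s, j, k] for (j, k) in rprs)
--         rprs.extend((s, x) for x in rsing)
--         rsing.append(s)
--     idx2comp_2b, comp2idx_2b = {}, {}
--     for n, (i, j) in enumerate(reversed(rprs), two_body_num):
--         idx2comp_2b[n] = [i, j]
--         comp2idx_2b.setdefault(i, {})[j] = n
--     idx2comp_3b = {}
--     for n, trip in enumerate(reversed(rtrps), three_body_num):
--         idx2comp_3b[n] = trip
--     return idx2comp_2b, idx2comp_3b, comp2idx_2b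
-- ===== Notes on version B (the rewrite author's own statement) =====
-- stated objective: alternative
-- what changed: Replaces A's interleaved triple-nested index loop by a Pascal-identity construction: combination lists are built back-to-front in one descending pass (singles -> pairs -> triples, each triple formed by prefixing the head onto an already-built sub-pair, so no third nested loop exists), then reversed once and poured into the dicts by flat enumerate passes; the dead comp2idx_3b nest is dropped.
import Mathlib
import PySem

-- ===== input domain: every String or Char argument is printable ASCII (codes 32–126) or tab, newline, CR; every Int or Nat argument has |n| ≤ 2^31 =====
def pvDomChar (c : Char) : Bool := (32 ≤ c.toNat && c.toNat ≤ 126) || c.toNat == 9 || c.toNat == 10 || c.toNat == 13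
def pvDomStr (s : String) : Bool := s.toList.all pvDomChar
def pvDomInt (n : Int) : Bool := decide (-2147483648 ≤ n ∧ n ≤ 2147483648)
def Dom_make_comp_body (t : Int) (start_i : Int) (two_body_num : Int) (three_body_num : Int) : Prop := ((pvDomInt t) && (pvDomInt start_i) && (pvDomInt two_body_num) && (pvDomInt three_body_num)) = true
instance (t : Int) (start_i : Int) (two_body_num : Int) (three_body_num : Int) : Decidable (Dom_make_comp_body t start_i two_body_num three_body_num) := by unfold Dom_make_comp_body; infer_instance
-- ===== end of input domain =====

-- B replaces A's interleaved triple-nested loop by a Pascal-identity construction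
-- (singles -> pairs -> triples built back-to-front in one descending pass, each triple
-- = head prefixed to a sub-pair), then flat fill passes; objective: alternative.

-- ===== PORT A =====
-- the loop state of A: the four dicts and the two running counters
structure MCBState where
  c2b : PySem.Dict Int (PySem.Dict Int Int)
  c3b : PySem.Dict Int (PySem.Dict Int (PySem.Dict Int Int))
  i2b : PySem.Dict Int (List Int)
  i3b : PySem.Dict Int (List Int)
  n2 : Int
  n3 : Int
deriving Repr, DecidableEq

-- body of A's innermost 'for k' loop
def pvStepK (i j : Int) (st : MCBState) (k : Int) : MCBState :=
  -- if i not in comp2idx_3b: comp2idx_3b[i] = dict()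
  let c3b := if st.c3b.contains i = false then st.c3b.insert i PySem.Dict.empty else st.c3b
  let di := c3b.getD i PySem.Dict.empty
  -- if j not in comp2idx_3b[i]: comp2idx_3b[i][j] = dict()
  let di := if di.contains j = false then di.insert j PySem.Dict.empty else di
  let dj := di.getD j PySem.Dict.empty
  -- comp2idx_3b[i][j][k] = three_body_num; idx2comp_3b[three_body_num] = [i, j, k]; three_body_num += 1
  { st with c3b := c3b.insert i (di.insert j (dj.insert k st.n3)),
            i3b := st.i3b.insert st.n3 [i, j, k],
            n3 := st.n3 + 1 }

-- body of A's 'for j' loop (2-body updates, then the 'for k' loop)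
def pvStepJ (t i : Int) (st : MCBState) (j : Int) : MCBState :=
  -- if i not in comp2idx_2b: comp2idx_2b[i] = dict()
  let c2b := if st.c2b.contains i = false then st.c2b.insert i PySem.Dict.empty else st.c2b
  -- comp2idx_2b[i][j] = two_body_num; idx2comp_2b[two_body_num] = [i, j]; two_body_num += 1
  let st := { st with c2b := c2b.insert i ((c2b.getD i PySem.Dict.empty).insert j st.n2),
                      i2b := st.i2b.insert st.n2 [i, j],
                      n2 := st.n2 + 1 }
  (PySem.List.pyRange (j + 1) (t + 1) 1).foldl (pvStepK i j) st

def make_comp_body (t : Int) (start_i : Int) (two_body_num : Int) (three_body_num : Int) : (List (Int × List Int)) × (List (Int × List Int)) × (List (Int × List (Int × Int))) :=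
  let st0 : MCBState := ⟨PySem.Dict.empty, PySem.Dict.empty, PySem.Dict.empty, PySem.Dict.empty, two_body_num, three_body_num⟩
  let st := (PySem.List.pyRange start_i (t + 1) 1).foldl
    (fun st i => (PySem.List.pyRange (i + 1) (t + 1) 1).foldl (pvStepJ t i) st) st0
  (st.i2b.items, st.i3b.items, st.c2b.items.map (fun p => (p.1, p.2.items)))

-- ===== PORT B =====
-- one iteration of B's descending loop: given the (reversed) singles/pairs/triples of
-- range(s+1, t+1), extend them for s — triples get [s, j, k] for each sub-pair (j, k);
-- pairs get (s, x) for each single; then s joins the singles (all list appends, as in Source B)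
def pvLexStep (st : List Int × List (Int × Int) × List (List Int)) (s : Int) :
    List Int × List (Int × Int) × List (List Int) :=
  (st.1 ++ [s],
   st.2.1 ++ st.1.map (fun x => (s, x)),
   st.2.2 ++ st.2.1.map (fun p => [s, p.1, p.2]))

def make_comp_body_alt (t : Int) (start_i : Int) (two_body_num : Int) (three_body_num : Int) : (List (Int × List Int)) × (List (Int × List Int)) × (List (Int × List (Int × Int))) :=
  -- for s in range(t, start_i - 1, -1): rtrps/rprs/rsing extends
  let st := (PySem.List.pyRange t (start_i - 1) (-1)).foldl pvLexStep ([], [], [])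
  let prs := st.2.1.reverse
  let trps := st.2.2.reverse
  -- for n, (i, j) in enumerate(reversed(rprs), two_body_num): fill i2b and c2b together
  -- (comp2idx_2b.setdefault(i, {})[j] = n  is exactly Dict.modify with an empty default)
  let fills := (PySem.List.enumerate prs two_body_num).foldl
    (fun (d : PySem.Dict Int (List Int) × PySem.Dict Int (PySem.Dict Int Int)) p =>
      (d.1.insert p.1 [p.2.1, p.2.2],
       d.2.modify p.2.1 PySem.Dict.empty (fun row => row.insert p.2.2 p.1)))
    (PySem.Dict.empty, PySem.Dict.empty)
  -- for n, trip in enumerate(reversed(rtrps), three_body_num): idx2comp_3b[n] = trip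
  let i3b := (PySem.List.enumerate trps three_body_num).foldl
    (fun d p => d.insert p.1 p.2) (PySem.Dict.empty : PySem.Dict Int (List Int))
  (fills.1.items, i3b.items, fills.2.items.map (fun p => (p.1, p.2.items)))

-- ===== PRECONDITION & SPEC =====
def Spec_make_comp_body (t : Int) (start_i : Int) (two_body_num : Int) (three_body_num : Int) (out : (List (Int × List Int)) × (List (Int × List Int)) × (List (Int × List (Int × Int)))) : Prop := out = make_comp_body_alt t start_i two_body_num three_body_num
instance (t : Int) (start_i : Int) (two_body_num : Int) (three_body_num : Int) (out : (List (Int × List Int)) × (List (Int × List Int)) × (List (Int × List (Int × Int)))) : Decidable (Spec_make_comp_body t start_i two_body_num three_body_num out) := by unfold Spec_make_comp_body; infer_instance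

-- ===== CLAIM (what is proved, stated in full; the proofs are below) =====
def Claim_equal_make_comp_body : Prop := ∀ (t : Int) (start_i : Int) (two_body_num : Int) (three_body_num : Int), Dom_make_comp_body t start_i two_body_num three_body_num → Spec_make_comp_body t start_i two_body_num three_body_num (make_comp_body t start_i two_body_num three_body_num)

-- ===== LEMMAS AND PROOFS =====

-- the lexicographic pair/triple lists of a list, by the same Pascal identity B uses
def lexPairs : List Int → List (Int × Int)
  | [] => []
  | i :: rest => rest.map (fun x => (i, x)) ++ lexPairs rest

def lexTrips : List Int → List (List Int)
  | [] => []
  | i :: rest => (lexPairs rest).map (fun p => [i, p.1, p.2]) ++ lexTrips rest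

-- A's guard-then-write on the nested comp2idx_2b dict is exactly Dict.modify
theorem pv_c2b_write (d : PySem.Dict Int (PySem.Dict Int Int)) (i j n : Int) :
    (let c := if d.contains i = false then d.insert i PySem.Dict.empty else d
     c.insert i ((c.getD i PySem.Dict.empty).insert j n))
    = d.modify i PySem.Dict.empty (fun row => row.insert j n) := by
  by_cases h : d.contains i = true
  · simp [h, PySem.Dict.modify]
  · simp only [Bool.not_eq_true] at h
    simp [h, PySem.Dict.modify, PySem.Dict.getD_insert_self, PySem.Dict.insert_insert_self,
      PySem.Dict.getD_of_not_contains d PySem.Dict.empty h]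

-- enumerate over a mapped list
theorem pv_enumerate_map {α β : Type} (f : α → β) (l : List α) (s : Int) :
    PySem.List.enumerate (l.map f) s = (PySem.List.enumerate l s).map (fun p => (p.1, f p.2)) := by
  induction l generalizing s with
  | nil => simp [PySem.List.enumerate]
  | cons x xs ih => simp [PySem.List.enumerate_cons, ih]

-- B's single fill loop carries two independent dicts: it splits into two folds
theorem pv_fill_split (l : List (Int × Int × Int)) (a : PySem.Dict Int (List Int)) (b : PySem.Dict Int (PySem.Dict Int Int)) :
    l.foldl (fun d p => (d.1.insert p.1 [p.2.1, p.2.2],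
        d.2.modify p.2.1 PySem.Dict.empty (fun row => row.insert p.2.2 p.1))) (a, b)
      = (l.foldl (fun d p => d.insert p.1 [p.2.1, p.2.2]) a,
         l.foldl (fun d p => d.modify p.2.1 PySem.Dict.empty (fun row => row.insert p.2.2 p.1)) b) := by
  induction l generalizing a b with
  | nil => rfl
  | cons x xs ih => simp [ih]

-- the innermost k-loop: leaves c2b/i2b/n2 alone, appends triples into i3b, advances n3
theorem pv_kfold (i j : Int) (ks : List Int) (st : MCBState) :
    (ks.foldl (pvStepK i j) st).c2b = st.c2b ∧
    (ks.foldl (pvStepK i j) st).i2b = st.i2b ∧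
    (ks.foldl (pvStepK i j) st).n2 = st.n2 ∧
    (ks.foldl (pvStepK i j) st).i3b
      = (PySem.List.enumerate ks st.n3).foldl (fun d p => d.insert p.1 [i, j, p.2]) st.i3b ∧
    (ks.foldl (pvStepK i j) st).n3 = st.n3 + (ks.length : Int) := by
  induction ks generalizing st with
  | nil => simp [PySem.List.enumerate]
  | cons k ks ih =>
    simp only [List.foldl_cons, PySem.List.enumerate_cons, List.foldl_cons]
    obtain ⟨h1, h2, h3, h4, h5⟩ := ih (pvStepK i j st k)
    refine ⟨?_, ?_, ?_, ?_, ?_⟩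
    · rw [h1]; simp [pvStepK]
    · rw [h2]; simp [pvStepK]
    · rw [h3]; simp [pvStepK]
    · rw [h4]; simp [pvStepK]
    · rw [h5]; simp [pvStepK]; ring

-- the j-loop over js for a fixed i
theorem pv_jfold (t i : Int) (js : List Int) (st : MCBState) :
    (js.foldl (pvStepJ t i) st).c2b
      = (PySem.List.enumerate js st.n2).foldl
          (fun d p => d.modify i PySem.Dict.empty (fun row => row.insert p.2 p.1)) st.c2b ∧
    (js.foldl (pvStepJ t i) st).i2b
      = (PySem.List.enumerate js st.n2).foldl (fun d p => d.insert p.1 [i, p.2]) st.i2b ∧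
    (js.foldl (pvStepJ t i) st).n2 = st.n2 + (js.length : Int) ∧
    (js.foldl (pvStepJ t i) st).i3b
      = (PySem.List.enumerate
           (js.flatMap (fun j => (PySem.List.pyRange (j + 1) (t + 1) 1).map (fun k => (j, k))))
           st.n3).foldl (fun d p => d.insert p.1 [i, p.2.1, p.2.2]) st.i3b ∧
    (js.foldl (pvStepJ t i) st).n3
      = st.n3 + ((js.flatMap (fun j => (PySem.List.pyRange (j + 1) (t + 1) 1).map (fun k => (j, k)))).length : Int) := by
  induction js generalizing st with
  | nil => simp [PySem.List.enumerate]
  | cons j js ih =>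
    obtain ⟨i1, i2, i3, i4, i5⟩ := ih (pvStepJ t i st j)
    obtain ⟨k1, k2, k3, k4, k5⟩ := pv_kfold i j (PySem.List.pyRange (j + 1) (t + 1) 1)
      { st with c2b := (if st.c2b.contains i = false then st.c2b.insert i PySem.Dict.empty else st.c2b).insert i
                  (((if st.c2b.contains i = false then st.c2b.insert i PySem.Dict.empty else st.c2b).getD i PySem.Dict.empty).insert j st.n2),
                i2b := st.i2b.insert st.n2 [i, j], n2 := st.n2 + 1 }
    have hdef : pvStepJ t i st j = (PySem.List.pyRange (j + 1) (t + 1) 1).foldl (pvStepK i j)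
      { st with c2b := (if st.c2b.contains i = false then st.c2b.insert i PySem.Dict.empty else st.c2b).insert i
                  (((if st.c2b.contains i = false then st.c2b.insert i PySem.Dict.empty else st.c2b).getD i PySem.Dict.empty).insert j st.n2),
                i2b := st.i2b.insert st.n2 [i, j], n2 := st.n2 + 1 } := rfl
    rw [List.foldl_cons]
    refine ⟨?_, ?_, ?_, ?_, ?_⟩
    · rw [i1, hdef, k3, k1]
      simp [PySem.List.enumerate_cons, pv_c2b_write]
    · rw [i2, hdef, k3, k2]
      simp [PySem.List.enumerate_cons]
    · rw [i3, hdef, k3]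
      simp; ring
    · rw [i4, hdef, k4, k5]
      simp only [List.flatMap_cons, PySem.List.enumerate_append, List.foldl_append,
        pv_enumerate_map, List.foldl_map, List.length_map]
    · rw [i5, hdef, k5]
      simp; ring

-- the outer i-loop
theorem pv_ifold (t : Int) (is : List Int) (st : MCBState) :
    (is.foldl (fun st i => (PySem.List.pyRange (i + 1) (t + 1) 1).foldl (pvStepJ t i) st) st).c2b
      = (PySem.List.enumerate
           (is.flatMap (fun i => (PySem.List.pyRange (i + 1) (t + 1) 1).map (fun j => (i, j))))
           st.n2).foldl
          (fun d p => d.modify p.2.1 PySem.Dict.empty (fun row => row.insert p.2.2 p.1)) st.c2b ∧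
    (is.foldl (fun st i => (PySem.List.pyRange (i + 1) (t + 1) 1).foldl (pvStepJ t i) st) st).i2b
      = (PySem.List.enumerate
           (is.flatMap (fun i => (PySem.List.pyRange (i + 1) (t + 1) 1).map (fun j => (i, j))))
           st.n2).foldl (fun d p => d.insert p.1 [p.2.1, p.2.2]) st.i2b ∧
    (is.foldl (fun st i => (PySem.List.pyRange (i + 1) (t + 1) 1).foldl (pvStepJ t i) st) st).n2
      = st.n2 + ((is.flatMap (fun i => (PySem.List.pyRange (i + 1) (t + 1) 1).map (fun j => (i, j)))).length : Int) ∧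
    (is.foldl (fun st i => (PySem.List.pyRange (i + 1) (t + 1) 1).foldl (pvStepJ t i) st) st).i3b
      = (PySem.List.enumerate
           (is.flatMap (fun i => (PySem.List.pyRange (i + 1) (t + 1) 1).flatMap
             (fun j => (PySem.List.pyRange (j + 1) (t + 1) 1).map (fun k => (i, j, k)))))
           st.n3).foldl (fun d p => d.insert p.1 [p.2.1, p.2.2.1, p.2.2.2]) st.i3b ∧
    (is.foldl (fun st i => (PySem.List.pyRange (i + 1) (t + 1) 1).foldl (pvStepJ t i) st) st).n3
      = st.n3 + ((is.flatMap (fun i => (PySem.List.pyRange (i + 1) (t + 1) 1).flatMap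
             (fun j => (PySem.List.pyRange (j + 1) (t + 1) 1).map (fun k => (i, j, k))))).length : Int) := by
  induction is generalizing st with
  | nil => simp
  | cons i is ih =>
    obtain ⟨i1, i2, i3, i4, i5⟩ := ih ((PySem.List.pyRange (i + 1) (t + 1) 1).foldl (pvStepJ t i) st)
    obtain ⟨j1, j2, j3, j4, j5⟩ := pv_jfold t i (PySem.List.pyRange (i + 1) (t + 1) 1) st
    have hT : (PySem.List.pyRange (i + 1) (t + 1) 1).flatMap
          (fun j => (PySem.List.pyRange (j + 1) (t + 1) 1).map (fun k => (i, j, k)))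
        = ((PySem.List.pyRange (i + 1) (t + 1) 1).flatMap
            (fun j => (PySem.List.pyRange (j + 1) (t + 1) 1).map (fun k => (j, k)))).map
            (fun q => (i, q.1, q.2)) := by
      simp [List.map_flatMap, List.map_map, Function.comp_def]
    rw [List.foldl_cons]
    refine ⟨?_, ?_, ?_, ?_, ?_⟩
    · rw [i1, j1, j3]
      simp only [List.flatMap_cons, PySem.List.enumerate_append, List.foldl_append,
        pv_enumerate_map, List.foldl_map, List.length_map]
    · rw [i2, j2, j3]
      simp only [List.flatMap_cons, PySem.List.enumerate_append, List.foldl_append,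
        pv_enumerate_map, List.foldl_map, List.length_map]
    · rw [i3, j3]
      simp [List.flatMap_cons]; ring
    · rw [i4, j4, j5]
      rw [List.flatMap_cons, hT]
      simp only [PySem.List.enumerate_append, List.foldl_append,
        pv_enumerate_map, List.foldl_map, List.length_map]
    · rw [i5, j5]
      rw [List.flatMap_cons, hT]
      simp [List.length_append]; ring
-- B's descending build over is.reverse produces the reversed singles/pairs/triples of is
theorem pv_build (is : List Int) :
    is.reverse.foldl pvLexStep ([], [], []) = (is.reverse, (lexPairs is).reverse, (lexTrips is).reverse) := by
  induction is with
  | nil => rfl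
  | cons i is ih =>
    simp only [List.reverse_cons, List.foldl_append, ih, List.foldl_cons, List.foldl_nil]
    simp [pvLexStep, lexPairs, lexTrips, List.map_reverse]

-- lexPairs of an ascending range is A's flatMap pair list
theorem pv_lexPairs_range (t : Int) : ∀ (n : Nat) (s : Int), (t + 1 - s).toNat = n →
    lexPairs (PySem.List.pyRange s (t + 1) 1)
      = (PySem.List.pyRange s (t + 1) 1).flatMap
          (fun i => (PySem.List.pyRange (i + 1) (t + 1) 1).map (fun j => (i, j))) := by
  intro n
  induction n with
  | zero =>
    intro s hs
    rw [PySem.List.pyRange_one_eq_nil (by omega)]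
    rfl
  | succ n ih =>
    intro s hs
    rw [PySem.List.pyRange_one_cons (by omega)]
    rw [List.flatMap_cons, lexPairs, ih (s + 1) (by omega)]

-- lexTrips of an ascending range is A's flatMap triple list, with triples written as lists
theorem pv_lexTrips_range (t : Int) : ∀ (n : Nat) (s : Int), (t + 1 - s).toNat = n →
    lexTrips (PySem.List.pyRange s (t + 1) 1)
      = ((PySem.List.pyRange s (t + 1) 1).flatMap
          (fun i => (PySem.List.pyRange (i + 1) (t + 1) 1).flatMap
            (fun j => (PySem.List.pyRange (j + 1) (t + 1) 1).map (fun k => (i, j, k))))).map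
          (fun q => [q.1, q.2.1, q.2.2]) := by
  intro n
  induction n with
  | zero =>
    intro s hs
    rw [PySem.List.pyRange_one_eq_nil (by omega)]
    rfl
  | succ n ih =>
    intro s hs
    rw [PySem.List.pyRange_one_cons (by omega)]
    rw [List.flatMap_cons, lexTrips, ih (s + 1) (by omega),
      pv_lexPairs_range t ((t + 1 - (s + 1)).toNat) (s + 1) rfl]
    simp [List.map_flatMap, List.map_map, Function.comp_def]

-- ===== VERDICT (by name: the statement is the Claim_ definition above) =====
theorem make_comp_body_spec : Claim_equal_make_comp_body := by
  intro t s n2 n3 _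
  unfold Spec_make_comp_body make_comp_body make_comp_body_alt
  have hrev : PySem.List.pyRange t (s - 1) (-1) = (PySem.List.pyRange s (t + 1) 1).reverse := by
    rw [PySem.List.pyRange_neg_one_eq_reverse]
    norm_num
  rw [hrev, pv_build]
  obtain ⟨h1, h2, _, h4, _⟩ :=
    pv_ifold t (PySem.List.pyRange s (t + 1) 1) ⟨PySem.Dict.empty, PySem.Dict.empty, PySem.Dict.empty, PySem.Dict.empty, n2, n3⟩
  simp only at h1 h2 h4
  simp only [List.reverse_reverse,
    pv_lexPairs_range t ((t + 1 - s).toNat) s rfl, pv_lexTrips_range t ((t + 1 - s).toNat) s rfl,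
    pv_enumerate_map, List.foldl_map]
  rw [pv_fill_split]
  rw [h1, h2, h4]
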